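-- pv_equiv track=rewrite | github.com/dudamarlena/pyc_source | pycfiles/pocoui-1.0.79.tar/text.py | split_format
-- ===== SOURCE A (Python) =====
-- def split_format(format):
--     """
--     Split a strftime format into an iterable of strings and format
--     items (``%x`` units).
--     """
--     p = c = f = 0
--     l = len(format)
--     while c < l:
--         if f:
--             yield '%' + format[c]
--             f = 0
--             p = c + 1
--         elif format[c] == '%':
--             if p < c:
--                 yield format[p:c]
--             f = 1
--         c += 1
--
--     if p < l:
--         yield format[p:]
-- ===== SOURCE B (Python) =====
-- def split_format(format):
--     """
--     Split a strftime format into an iterable of strings and format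
--     items (``%x`` units), jumping between '%' positions with find().
--     """
--     l = len(format)
--     p = 0
--     while True:
--         i = format.find('%', p)
--         if i == -1 or i + 1 == l:
--             break
--         if p < i:
--             yield format[p:i]
--         yield '%' + format[i + 1]
--         p = i + 2
--     if p < l:
--         yield format[p:]
-- ===== Notes on version B (the rewrite author's own statement) =====
-- stated objective: faster
-- what changed: Replaced the per-character state machine (cursor c with pending-start p and flag f) by an index-jumping loop that repeatedly calls format.find('%', p) and emits the pending slice, the two-char unit and finally the tail; find skips plain-text runs in C speed.
-- intended difference: On formats ending in a single bare '%' preceded by unconsumed text (e.g. 'a%'), A yields the pending text twice, alone and again inside the final chunk (['a', 'a%']), while B yields the tail once (['a%']); B's value is intended because its pieces concatenate back to the input. — e.g. on split_format("a%"): A returns ["a", "a%"], B returns ["a%"]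
import Mathlib
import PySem

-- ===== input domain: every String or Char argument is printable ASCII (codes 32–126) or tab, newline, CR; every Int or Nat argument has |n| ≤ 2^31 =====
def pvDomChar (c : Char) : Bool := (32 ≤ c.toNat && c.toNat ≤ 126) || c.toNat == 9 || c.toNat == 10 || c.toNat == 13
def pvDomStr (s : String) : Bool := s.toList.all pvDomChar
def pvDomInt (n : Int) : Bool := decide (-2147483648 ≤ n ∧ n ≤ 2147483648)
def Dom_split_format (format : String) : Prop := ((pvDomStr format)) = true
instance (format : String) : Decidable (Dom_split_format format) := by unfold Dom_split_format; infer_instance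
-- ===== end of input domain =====

-- B replaces A's per-character flag state machine by an index-jumping loop on format.find('%', p)
-- (measured faster in a timing run: find skips plain-text runs at once);
-- on formats ending in a lone bare '%' preceded by pending text A double-emits that text (D_ below),
-- B emits the tail once.

-- ===== PORT A =====
-- A's while loop over c with state (p, f); format[p:c] / format[p:] are PySem slices,
-- '%' + format[c] is the two-char string.
def pvALoop (cs : List Char) (c p : Nat) (f : Bool) : Nat → List String
  | 0 => if p < cs.length then [String.ofList (PySem.List.slice cs (some (p : Int)) none)] else []
  | fuel + 1 =>
    if h : c < cs.length then
      if f then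
        String.ofList ['%', cs[c]] :: pvALoop cs (c + 1) (c + 1) false fuel
      else if cs[c] = '%' then
        (if p < c then [String.ofList (PySem.List.slice cs (some (p : Int)) (some (c : Int)))] else []) ++
          pvALoop cs (c + 1) p true fuel
      else
        pvALoop cs (c + 1) p f fuel
    else
      if p < cs.length then [String.ofList (PySem.List.slice cs (some (p : Int)) none)] else []

def split_format (format : String) : List String :=
  pvALoop format.toList 0 0 false format.toList.length

-- ===== PORT B =====
-- B's `while True` loop with i = format.find('%', p) (PySem.Chars.findFrom, exact); fuel = len + 1 is a
-- pure totality guard (p grows by ≥ 2 per iteration, so fuel never reaches 0 from len + 1); likewise the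
-- `match` on format[i+1] only makes the access total (in the taken branch i + 1 < len always holds).
def pvBLoop (cs : List Char) (p : Nat) : Nat → List String
  | 0 => []
  | fuel + 1 =>
    let i := PySem.Chars.findFrom cs ['%'] (p : Int) none
    if i = -1 ∨ i + 1 = (cs.length : Int) then
      if p < cs.length then [String.ofList (PySem.List.slice cs (some (p : Int)) none)] else []
    else
      (if p < i.toNat then [String.ofList (PySem.List.slice cs (some (p : Int)) (some i))] else []) ++
        match PySem.List.pyGet? cs (i + 1) with
        | some ch => String.ofList ['%', ch] :: pvBLoop cs (i.toNat + 2) fuel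
        | none => []

def split_format_alt (format : String) : List String :=
  pvBLoop format.toList 0 (format.toList.length + 1)

-- ===== PRECONDITION & SPEC =====
-- pvRun cs p = length of the maximal run of '%' characters ending just before index p.
def pvRun (cs : List Char) (p : Nat) : Nat := ((cs.take p).reverse.takeWhile (· = '%')).length

-- On formats ending in a single bare '%' whose preceding character is plain text (not consumed as the
-- second character of a '%x' unit), A yields the pending text twice — alone and again inside the final
-- chunk (e.g. 'a%' → ['a', 'a%']) — while B yields the tail once (['a%']), which is intended because
-- B's pieces concatenate back to the input.
def D_split_format (format : String) : Prop :=
  2 ≤ format.toList.length ∧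
  format.toList.getLast? = some '%' ∧
  pvRun format.toList (format.toList.length - 1) = 0 ∧
  pvRun format.toList (format.toList.length - 2) % 2 = 0
instance (format : String) : Decidable (D_split_format format) := by unfold D_split_format; infer_instance

def Spec_split_format (format : String) (out : List String) : Prop :=
  ¬ D_split_format format → out = split_format_alt format
instance (format : String) (out : List String) : Decidable (Spec_split_format format out) := by unfold Spec_split_format; infer_instance

def pvDiffWitness_split_format : String := "a%"
def pvDiffWitnessOut_split_format : (List String) × (List String) := (["a", "a%"], ["a%"])

-- ===== CLAIM (what is proved, stated in full; the proofs are below) =====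
def Claim_unchanged_split_format : Prop := ∀ (format : String), Dom_split_format format → Spec_split_format format (split_format format)
def Claim_changed_split_format : Prop := Dom_split_format (pvDiffWitness_split_format) ∧ D_split_format (pvDiffWitness_split_format) ∧ split_format (pvDiffWitness_split_format) = pvDiffWitnessOut_split_format.1 ∧ split_format_alt (pvDiffWitness_split_format) = pvDiffWitnessOut_split_format.2 ∧ pvDiffWitnessOut_split_format.1 ≠ pvDiffWitnessOut_split_format.2

-- ===== LEMMAS AND PROOFS =====

-- ['%'] is a prefix of cs.drop j iff position j exists and holds '%'.
lemma pv_prefix_pct_iff (cs : List Char) (j : Nat) :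
    (['%'] <+: cs.drop j) ↔ ∃ h : j < cs.length, cs[j] = '%' := by
  constructor
  · rintro ⟨t, ht⟩
    have h0 : (cs.drop j)[0]? = some '%' := by rw [← ht]; rfl
    rw [List.getElem?_drop] at h0
    simp only [Nat.add_zero] at h0
    rw [List.getElem?_eq_some_iff] at h0
    exact ⟨h0.1, h0.2⟩
  · rintro ⟨h, hc⟩
    refine ⟨(cs.drop j).tail, ?_⟩
    rw [List.drop_eq_getElem_cons h, hc]; rfl

-- find('%', p) is -1 when no '%' occurs at an index ≥ p.
lemma pv_find_none (cs : List Char) (p : Nat) (hp : p ≤ cs.length)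
    (h : ∀ j (hj : j < cs.length), p ≤ j → cs[j] ≠ '%') :
    PySem.Chars.findFrom cs ['%'] (p : Int) none = -1 := by
  rw [PySem.Chars.findFrom_natCast_eq_neg_one_iff cs ['%'] p hp]
  rw [List.singleton_infix_iff]
  intro hm
  obtain ⟨j, hj, hg⟩ := List.mem_iff_getElem.mp hm
  have hj' : j < cs.length - p := by simpa using hj
  rw [List.getElem_drop] at hg
  exact h (p + j) (by omega) (by omega) hg

-- find('%', p) returns exactly c when cs[c] = '%' and no '%' occurs in [p, c).
lemma pv_find_eq (cs : List Char) (p c : Nat) (hc : c < cs.length) (hp : p ≤ c)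
    (hcs : cs[c] = '%')
    (hb : ∀ j (hj : j < cs.length), p ≤ j → j < c → cs[j] ≠ '%') :
    PySem.Chars.findFrom cs ['%'] (p : Int) none = (c : Int) := by
  have hple : p ≤ cs.length := by omega
  have hne : PySem.Chars.findFrom cs ['%'] (p : Int) none ≠ -1 := by
    rw [Ne, PySem.Chars.findFrom_natCast_eq_neg_one_iff cs ['%'] p hple, not_not,
      List.singleton_infix_iff]
    exact List.mem_iff_getElem.mpr ⟨c - p, by simp; omega,
      by rw [List.getElem_drop]; simpa [Nat.add_sub_cancel' hp] using hcs⟩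
  obtain ⟨hge, hpre, hmin⟩ := PySem.Chars.findFrom_natCast_spec cs ['%'] p hple hne
  set r := PySem.Chars.findFrom cs ['%'] (p : Int) none with hr
  have hr0 : 0 ≤ r := le_trans (by positivity) hge
  obtain ⟨hrlt, hrc⟩ := (pv_prefix_pct_iff cs r.toNat).mp hpre
  have hge' : p ≤ r.toNat := by omega
  have h1 : ¬ r.toNat < c := fun hlt => hb r.toNat hrlt hge' hlt hrc
  have h2 : ¬ c < r.toNat := fun hlt =>
    hmin c (by omega) hlt ((pv_prefix_pct_iff cs c).mpr ⟨hc, hcs⟩)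
  have : r.toNat = c := by omega
  omega

-- pvRun steps: a non-'%' at index j resets the run, a '%' extends it.
lemma pvRun_zero (cs : List Char) : pvRun cs 0 = 0 := by simp [pvRun]

lemma pvRun_reset (cs : List Char) (j : Nat) (hj : j < cs.length) (h : cs[j] ≠ '%') :
    pvRun cs (j + 1) = 0 := by
  unfold pvRun
  have ht : cs.take (j + 1) = cs.take j ++ [cs[j]] := by
    rw [List.take_add_one, List.getElem?_eq_getElem hj]; rfl
  rw [ht, List.reverse_append]
  simp [h]

lemma pvRun_step (cs : List Char) (j : Nat) (hj : j < cs.length) (h : cs[j] = '%') :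
    pvRun cs (j + 1) = pvRun cs j + 1 := by
  unfold pvRun
  have ht : cs.take (j + 1) = cs.take j ++ [cs[j]] := by
    rw [List.take_add_one, List.getElem?_eq_getElem hj]; rfl
  rw [ht, List.reverse_append]
  simp [h]

-- Main invariant: with f = 0, no '%' in cs[p, c), and an even '%'-run ending before p, A's scan from c
-- equals B's find-jump loop from p on every format outside D_ (any A-fuel ≥ len - c and B-fuel ≥ len + 1 - p suffice).
lemma pv_main (cs : List Char)
    (hD : ¬ (2 ≤ cs.length ∧ cs.getLast? = some '%' ∧
      pvRun cs (cs.length - 1) = 0 ∧ pvRun cs (cs.length - 2) % 2 = 0)) :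
    ∀ af c p fuel, cs.length ≤ c + af → p ≤ c → p ≤ cs.length →
      cs.length + 1 - p ≤ fuel →
      (∀ j (hj : j < cs.length), p ≤ j → j < c → cs[j] ≠ '%') →
      pvRun cs p % 2 = 0 →
      pvALoop cs c p false af = pvBLoop cs p fuel := by
  intro af
  induction af using Nat.strong_induction_on with
  | _ af IH =>
    intro c p fuel hn hp hpl hfuel hinv hrun
    cases fuel with
    | zero => omega
    | succ f =>
      cases af with
      | zero =>
        have hcl : ¬ c < cs.length := by omega
        rw [pvALoop]
        have hfind := pv_find_none cs p hpl (fun j hj hjp => hinv j hj hjp (by omega))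
        simp only [pvBLoop, hfind]
        simp
      | succ af' =>
        by_cases hcl : c < cs.length
        · rw [pvALoop]
          simp only [hcl, dite_true, if_false, Bool.false_eq_true]
          by_cases hpc : cs[c] = '%'
          · have hfind := pv_find_eq cs p c hcl hp hpc (fun j hj hjp hjc => hinv j hj hjp hjc)
            simp only [hpc, if_true, pvBLoop, hfind]
            by_cases h2 : c + 1 < cs.length
            · have hcond : ¬ ((c : Int) = -1 ∨ (c : Int) + 1 = (cs.length : Int)) := by omega
              simp only [if_neg hcond, Int.toNat_natCast]
              have hget : PySem.List.pyGet? cs ((c : Int) + 1) = some cs[c + 1] := by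
                have : ((c : Int) + 1) = ((c + 1 : Nat) : Int) := by omega
                rw [this, PySem.List.pyGet?_natCast, List.getElem?_eq_getElem h2]
              rw [hget]
              obtain ⟨af'', rfl⟩ : ∃ k, af' = k + 1 := ⟨af' - 1, by omega⟩
              rw [pvALoop]
              simp only [show c + 1 < cs.length from h2, dite_true, if_true]
              have hrun' : pvRun cs (c + 2) % 2 = 0 := by
                by_cases hnx : cs[c + 1] = '%'
                · rw [show c + 2 = (c + 1) + 1 from rfl, pvRun_step cs (c + 1) h2 hnx,
                    pvRun_step cs c hcl hpc]
                  rcases Nat.lt_or_ge p c with hlt | hge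
                  · have : pvRun cs c = 0 := by
                      have hc1 : c - 1 < cs.length := by omega
                      have := pvRun_reset cs (c - 1) hc1 (hinv (c - 1) hc1 (by omega) (by omega))
                      simpa [show c - 1 + 1 = c by omega] using this
                    omega
                  · have : p = c := by omega
                    subst this; omega
                · rw [show c + 2 = (c + 1) + 1 from rfl, pvRun_reset cs (c + 1) h2 hnx]
              have hrec := IH af'' (by omega) (c + 2) (c + 2) f (by omega) le_rfl (by omega)
                (by omega) (fun j hj h1 h2 => absurd h2 (by omega)) hrun'
              rw [hrec]
              rfl
            · -- c is the last index and holds '%': outside D_ the pending slice must be empty (p = c)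
              have hc1 : c + 1 = cs.length := by omega
              have hpeq : p = c := by
                by_contra hne
                have hplt : p < c := by omega
                apply hD
                refine ⟨by omega, ?_, ?_, ?_⟩
                · rw [List.getLast?_eq_getElem?, show cs.length - 1 = c by omega,
                    List.getElem?_eq_getElem hcl]
                  simp [hpc]
                · have hc2 : c - 1 < cs.length := by omega
                  have := pvRun_reset cs (c - 1) hc2 (hinv (c - 1) hc2 (by omega) (by omega))
                  simpa [show c - 1 + 1 = cs.length - 1 by omega] using this
                · have hlen2 : cs.length - 2 = c - 1 := by omega
                  rcases Nat.lt_or_ge p (c - 1) with hlt | hge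
                  · have hc3 : c - 2 < cs.length := by omega
                    have := pvRun_reset cs (c - 2) hc3 (hinv (c - 2) hc3 (by omega) (by omega))
                    rw [hlen2, show c - 1 = (c - 2) + 1 by omega, this]
                  · have : p = c - 1 := by omega
                    rw [hlen2, ← this]; exact hrun
              subst hpeq
              have hcond : ((p : Int) = -1 ∨ (p : Int) + 1 = (cs.length : Int)) := by
                right; omega
              simp only [if_pos hcond, lt_irrefl, if_false]
              cases af' with
              | zero => rw [pvALoop]; simp
              | succ af'' =>
                rw [pvALoop]
                simp only [show ¬ (p + 1 < cs.length) from by omega, dite_false]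
                simp
          · simp only [hpc, if_false]
            exact IH af' (by omega) (c + 1) p (f + 1) (by omega) (by omega) hpl hfuel
              (fun j hj hjp hjc => by
                rcases Nat.lt_or_ge j c with h | h
                · exact hinv j hj hjp h
                · have : j = c := by omega
                  subst this; exact hpc) hrun
        · rw [pvALoop]
          simp only [hcl, dite_false]
          have hfind := pv_find_none cs p hpl (fun j hj hjp => hinv j hj hjp (by omega))
          simp only [pvBLoop, hfind]
          simp

-- ===== VERDICT (by name: the statements are the Claim_ definitions above) =====
theorem split_format_spec : Claim_unchanged_split_format := by
  intro format _ hD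
  unfold D_split_format at hD
  unfold split_format split_format_alt
  exact pv_main format.toList hD format.toList.length 0 0 (format.toList.length + 1)
    (by omega) (by omega) (by omega) (by omega) (by omega) (by simp [pvRun_zero])

theorem split_format_changed : Claim_changed_split_format := by
  unfold Claim_changed_split_format; decide
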